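-- pv_equiv track=rewrite | github.com/timothynn/dotfiles | scripts/keybind-viewer.py | categorize_keybinding
-- ===== SOURCE A (Python) =====
-- def categorize_keybinding(keybinding):
--     """Categorize a keybinding based on its action"""
--     action = keybinding['action'].lower()
--
--     if any(word in action for word in ['workspace', 'movetoworkspace']):
--         return "Workspaces"
--     elif any(word in action for word in ['killactive', 'movefocus', 'movewindow', 'resizewindow', 'togglefloating', 'togglesplit', 'pseudo']):
--         return "Window Management"
--     elif any(word in action for word in ['terminal', 'kitty', 'firefox', 'rofi', 'dolphin', 'filemanager']):
--         return "Applications"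
--     elif any(word in action for word in ['volume', 'brightness', 'playerctl', 'mute']):
--         return "Media"
--     elif 'pypr' in action or '$pypr' in action:
--         return "PyprLand"
--     elif any(word in action for word in ['exit', 'waybar', 'dpms']):
--         return "System"
--     else:
--         return "Other"
-- ===== SOURCE B (Python) =====
-- # Flat keyword -> priority map; exhaustive scan accumulating the MINIMUM matched
-- # priority (no early return, no branch chain), then index into a category table.
-- # '$pypr' is dropped: any action containing '$pypr' contains 'pypr'.
-- KEYWORD_PRIORITY = {
--     'workspace': 0, 'movetoworkspace': 0,
--     'killactive': 1, 'movefocus': 1, 'movewindow': 1, 'resizewindow': 1,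
--     'togglefloating': 1, 'togglesplit': 1, 'pseudo': 1,
--     'terminal': 2, 'kitty': 2, 'firefox': 2, 'rofi': 2, 'dolphin': 2, 'filemanager': 2,
--     'volume': 3, 'brightness': 3, 'playerctl': 3, 'mute': 3,
--     'pypr': 4,
--     'exit': 5, 'waybar': 5, 'dpms': 5,
-- }
-- CATEGORIES = ["Workspaces", "Window Management", "Applications", "Media",
--               "PyprLand", "System", "Other"]
--
--
-- def categorize_keybinding(keybinding):
--     """Categorize a keybinding based on its action"""
--     action = keybinding['action'].lower()
--     best = 6
--     for word, prio in KEYWORD_PRIORITY.items():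
--         if word in action:
--             best = min(best, prio)
--     return CATEGORIES[best]
-- ===== Notes on version B (the rewrite author's own statement) =====
-- stated objective: alternative
-- what changed: Replaces the ordered first-match if/elif chain by an exhaustive scan over a flat keyword->priority map that accumulates the minimum matched priority and indexes a category table (no early exit, no branch chain); the redundant '$pypr' test is dropped as subsumed by 'pypr'.
import Mathlib
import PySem

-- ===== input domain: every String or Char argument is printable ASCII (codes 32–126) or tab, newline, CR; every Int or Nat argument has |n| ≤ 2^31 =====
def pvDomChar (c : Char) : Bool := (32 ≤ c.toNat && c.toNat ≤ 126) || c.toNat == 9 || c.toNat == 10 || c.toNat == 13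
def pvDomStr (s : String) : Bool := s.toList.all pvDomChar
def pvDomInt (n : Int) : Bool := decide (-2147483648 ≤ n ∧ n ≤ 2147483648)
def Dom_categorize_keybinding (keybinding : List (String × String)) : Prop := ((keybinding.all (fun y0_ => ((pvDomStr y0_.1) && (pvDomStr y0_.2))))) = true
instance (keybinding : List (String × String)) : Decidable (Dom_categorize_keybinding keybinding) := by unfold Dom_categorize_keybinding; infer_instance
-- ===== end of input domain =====

-- B replaces A's ordered first-match if/elif chain by an exhaustive minimum-priority fold
-- over a flat keyword->priority map, indexing a category table (alternative; same cost).


-- ===== PORT A =====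
-- literal transliteration of A's if/elif chain; 'word in action' = PySem.Str.isIn word action
def categorize_keybinding (keybinding : List (String × String)) : String :=
  match PySem.Dict.get? (PySem.Dict.mk keybinding) "action" with
  | none => ""   -- unreachable under Pre_ (Python raises KeyError here)
  | some act =>
    let action := PySem.Str.lower act
    if ["workspace", "movetoworkspace"].any (fun word => PySem.Str.isIn word action) then
      "Workspaces"
    else if ["killactive", "movefocus", "movewindow", "resizewindow", "togglefloating", "togglesplit", "pseudo"].any (fun word => PySem.Str.isIn word action) then
      "Window Management"
    else if ["terminal", "kitty", "firefox", "rofi", "dolphin", "filemanager"].any (fun word => PySem.Str.isIn word action) then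
      "Applications"
    else if ["volume", "brightness", "playerctl", "mute"].any (fun word => PySem.Str.isIn word action) then
      "Media"
    else if PySem.Str.isIn "pypr" action || PySem.Str.isIn "$pypr" action then
      "PyprLand"
    else if ["exit", "waybar", "dpms"].any (fun word => PySem.Str.isIn word action) then
      "System"
    else
      "Other"

-- ===== PORT B =====
-- Source B's flat keyword->priority map (dict in insertion order) and category table
def pvKEYWORD_PRIORITY : List (String × Nat) :=
  [("workspace", 0), ("movetoworkspace", 0),
   ("killactive", 1), ("movefocus", 1), ("movewindow", 1), ("resizewindow", 1),
   ("togglefloating", 1), ("togglesplit", 1), ("pseudo", 1),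
   ("terminal", 2), ("kitty", 2), ("firefox", 2), ("rofi", 2), ("dolphin", 2), ("filemanager", 2),
   ("volume", 3), ("brightness", 3), ("playerctl", 3), ("mute", 3),
   ("pypr", 4),
   ("exit", 5), ("waybar", 5), ("dpms", 5)]

def pvCATEGORIES : List String :=
  ["Workspaces", "Window Management", "Applications", "Media", "PyprLand", "System", "Other"]

-- Source B's for-loop with the 'best' accumulator = a foldl taking the minimum matched priority
def categorize_keybinding_alt (keybinding : List (String × String)) : String :=
  match PySem.Dict.get? (PySem.Dict.mk keybinding) "action" with
  | none => ""   -- unreachable under Pre_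
  | some act =>
    let action := PySem.Str.lower act
    let best := pvKEYWORD_PRIORITY.foldl
      (fun b wp => if PySem.Str.isIn wp.1 action then min b wp.2 else b) 6
    pvCATEGORIES.getD best "Other"   -- CATEGORIES[best]; best ≤ 6 always in range

-- ===== PRECONDITION & SPEC =====
-- Pre_ excludes exactly the inputs with no "action" key, where the Python A raises KeyError.
def Pre_categorize_keybinding (keybinding : List (String × String)) : Prop :=
  (PySem.Dict.get? (PySem.Dict.mk keybinding) "action").isSome = true
instance (keybinding : List (String × String)) : Decidable (Pre_categorize_keybinding keybinding) := by unfold Pre_categorize_keybinding; infer_instance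
def pvWitness_categorize_keybinding : (List (String × String)) := [("action", "workspace 1")]

def Spec_categorize_keybinding (keybinding : List (String × String)) (out : String) : Prop := out = categorize_keybinding_alt keybinding
instance (keybinding : List (String × String)) (out : String) : Decidable (Spec_categorize_keybinding keybinding out) := by unfold Spec_categorize_keybinding; infer_instance

-- ===== CLAIM (what is proved, stated in full; the proofs are below) =====
def Claim_equal_categorize_keybinding : Prop := ∀ (keybinding : List (String × String)), Dom_categorize_keybinding keybinding → Pre_categorize_keybinding keybinding → Spec_categorize_keybinding keybinding (categorize_keybinding keybinding)

-- ===== LEMMAS AND PROOFS =====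

-- "$pypr" occurring in the action forces "pypr" to occur in it as well (so A's or-clause collapses)
theorem pv_pypr_subsume (a : String) (h : PySem.Str.isIn "$pypr" a = true) :
    PySem.Str.isIn "pypr" a = true := by
  rw [PySem.Str.isIn_iff_infix] at h ⊢
  exact List.IsInfix.trans (by decide : "pypr".toList <:+: "$pypr".toList) h

-- folding the min over a block of keywords that all carry the same priority p
theorem pv_foldl_group (a : String) (p : Nat) (ws : List String) (rest : List (String × Nat)) (b : Nat) :
    ((ws.map (fun w => (w, p))) ++ rest).foldl
        (fun b wp => if PySem.Str.isIn wp.1 a then min b wp.2 else b) b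
    = rest.foldl (fun b wp => if PySem.Str.isIn wp.1 a then min b wp.2 else b)
        (if ws.any (fun w => PySem.Str.isIn w a) then min b p else b) := by
  induction ws generalizing b with
  | nil => simp
  | cons w ws ih =>
    simp only [List.map_cons, List.cons_append, List.foldl_cons, List.any_cons]
    by_cases h : PySem.Str.isIn w a = true
    · rw [if_pos h, ih]
      have hc : (PySem.Str.isIn w a || ws.any fun w => PySem.Str.isIn w a) = true := by
        rw [h]; rfl
      rw [if_pos hc]
      congr 1
      by_cases h2 : (ws.any fun w => PySem.Str.isIn w a) = true
      · rw [if_pos h2, min_assoc, min_self]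
      · rw [if_neg h2]
    · rw [if_neg h, ih]
      congr 1
      simp only [Bool.not_eq_true] at h
      simp only [h, Bool.false_or]

-- 'pypr' || '$pypr' collapses to 'pypr'
theorem pv_pypr_or (a : String) :
    (PySem.Str.isIn "pypr" a || PySem.Str.isIn "$pypr" a) = PySem.Str.isIn "pypr" a := by
  by_cases h : PySem.Str.isIn "$pypr" a = true
  · rw [h, pv_pypr_subsume a h]; rfl
  · simp only [Bool.not_eq_true] at h
    rw [h, Bool.or_false]

-- the branch chain equals the min-priority table lookup, for any six match bits (64 cases)
theorem pv_table (b0 b1 b2 b3 b4 b5 : Bool) :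
    (if b0 then "Workspaces"
     else if b1 then "Window Management"
     else if b2 then "Applications"
     else if b3 then "Media"
     else if b4 then "PyprLand"
     else if b5 then "System"
     else "Other")
    = pvCATEGORIES.getD
        (let v0 := if b0 then min 6 0 else 6
         let v1 := if b1 then min v0 1 else v0
         let v2 := if b2 then min v1 2 else v1
         let v3 := if b3 then min v2 3 else v2
         let v4 := if b4 then min v3 4 else v3
         let v5 := if b5 then min v4 5 else v4
         v5) "Other" := by revert b0 b1 b2 b3 b4 b5; decide

-- the chain of A equals B's min-priority fold + table lookup, for any action string
theorem pv_chain_eq_fold (action : String) :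
    (if ["workspace", "movetoworkspace"].any (fun word => PySem.Str.isIn word action) then
      "Workspaces"
    else if ["killactive", "movefocus", "movewindow", "resizewindow", "togglefloating", "togglesplit", "pseudo"].any (fun word => PySem.Str.isIn word action) then
      "Window Management"
    else if ["terminal", "kitty", "firefox", "rofi", "dolphin", "filemanager"].any (fun word => PySem.Str.isIn word action) then
      "Applications"
    else if ["volume", "brightness", "playerctl", "mute"].any (fun word => PySem.Str.isIn word action) then
      "Media"
    else if PySem.Str.isIn "pypr" action || PySem.Str.isIn "$pypr" action then
      "PyprLand"
    else if ["exit", "waybar", "dpms"].any (fun word => PySem.Str.isIn word action) then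
      "System"
    else
      "Other")
    = pvCATEGORIES.getD
        (pvKEYWORD_PRIORITY.foldl
          (fun b wp => if PySem.Str.isIn wp.1 action then min b wp.2 else b) 6) "Other" := by
  have hsplit : pvKEYWORD_PRIORITY =
      (["workspace", "movetoworkspace"].map (fun w => (w, 0)))
      ++ ((["killactive", "movefocus", "movewindow", "resizewindow", "togglefloating", "togglesplit", "pseudo"].map (fun w => (w, 1)))
      ++ ((["terminal", "kitty", "firefox", "rofi", "dolphin", "filemanager"].map (fun w => (w, 2)))
      ++ ((["volume", "brightness", "playerctl", "mute"].map (fun w => (w, 3)))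
      ++ ((["pypr"].map (fun w => (w, 4)))
      ++ ((["exit", "waybar", "dpms"].map (fun w => (w, 5)))
      ++ ([] : List (String × Nat))))))) := by rfl
  rw [hsplit, pv_foldl_group, pv_foldl_group, pv_foldl_group, pv_foldl_group,
      pv_foldl_group, pv_foldl_group]
  simp only [List.any_cons, List.any_nil, Bool.or_false, List.foldl_nil, pv_pypr_or]
  exact pv_table _ _ _ _ _ _

theorem categorize_keybinding_eq (keybinding : List (String × String)) :
    categorize_keybinding keybinding = categorize_keybinding_alt keybinding := by
  unfold categorize_keybinding categorize_keybinding_alt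
  cases PySem.Dict.get? (PySem.Dict.mk keybinding) "action" with
  | none => rfl
  | some act => exact pv_chain_eq_fold (PySem.Str.lower act)

-- ===== VERDICT (by name: the statement is the Claim_ definition above) =====
theorem categorize_keybinding_spec : Claim_equal_categorize_keybinding := by
  intro kb _ _
  exact categorize_keybinding_eq kb
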